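-- pv_equiv track=rewrite | github.com/AIAmplitudes/AIAmplitudes_common_public | fbspaces.py | SB_to_dict
-- ===== SOURCE A (Python) =====
-- def SB_to_dict(mystring):
--     def to_coef(mystr):
--         if mystr == '-':
--             return -1
--         elif mystr == '':
--             return 1
--         else:
--             return int(mystr)
--
--     m = mystring.replace('-', '+-').replace(",", "").split('+')
--     m2 = [el.replace("(", "").replace(")", "").replace("*", "").split("SB") for el in m]
--     sbdict = {elem[1]: to_coef(elem[0]) for elem in m2 if len(elem) > 1}
--     return sbdict
-- ===== SOURCE B (Python) =====
-- def SB_to_dict(mystring):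
--     def to_coef(mystr):
--         if mystr == '-':
--             return -1
--         elif mystr == '':
--             return 1
--         else:
--             return int(mystr)
--
--     # one pass: split on '+'/'-' term boundaries while dropping '(', ')', ',', '*'
--     terms = []
--     cur = ''
--     for ch in mystring:
--         if ch == '+':
--             terms.append(cur)
--             cur = ''
--         elif ch == '-':
--             terms.append(cur)
--             cur = '-'
--         elif ch not in '(),*':
--             cur += ch
--     terms.append(cur)
--
--     out = {}
--     for t in terms:
--         i = t.find('SB')
--         if i >= 0:
--             rest = t[i + 2:]
--             j = rest.find('SB')
--             out[rest if j < 0 else rest[:j]] = to_coef(t[:i])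
--     return out
-- ===== Notes on version B (the rewrite author's own statement) =====
-- stated objective: alternative
-- what changed: Replaced A's global replace/replace/split('+') plus per-token replace-chain and split('SB') pipeline with a single character scan that tokenizes on plus/minus boundaries while dropping parens, commas and stars, followed by a find()-based parse of each term's coefficient and key.
import Mathlib
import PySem

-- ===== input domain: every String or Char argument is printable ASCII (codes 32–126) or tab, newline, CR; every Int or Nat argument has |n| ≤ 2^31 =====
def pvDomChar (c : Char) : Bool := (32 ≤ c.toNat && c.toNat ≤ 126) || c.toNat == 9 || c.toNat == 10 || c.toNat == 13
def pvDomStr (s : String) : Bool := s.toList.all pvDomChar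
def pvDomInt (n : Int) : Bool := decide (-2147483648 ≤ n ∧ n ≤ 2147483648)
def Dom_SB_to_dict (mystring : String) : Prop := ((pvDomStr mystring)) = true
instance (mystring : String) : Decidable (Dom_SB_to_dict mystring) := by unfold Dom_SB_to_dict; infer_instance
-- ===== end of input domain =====

-- B replaces A's replace/replace/split/replace-chain pipeline by a single character scan that
-- tokenizes on '+'/'-' while dropping '(),*', then a find-based parse of each term
-- (objective: alternative — same O(n) cost, a different algorithm).

-- shared helper: BOTH Pythons define this identical inner `to_coef`; `int(mystr)` is
-- PySem.Int.ofChars? — the `.getD 0` is reached only where Python raises ValueError,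
-- which Pre_SB_to_dict excludes.
def pvToCoef (cs : List Char) : Int :=
  if cs = ['-'] then -1
  else if cs = [] then 1
  else (PySem.Int.ofChars? cs).getD 0

-- ===== PORT A =====
def SB_to_dict (mystring : String) : List (String × Int) :=
  let m := PySem.Chars.splitOn
    (PySem.Chars.replace (PySem.Chars.replace mystring.toList ['-'] ['+', '-']) [','] []) ['+']
  let m2 := m.map (fun el =>
    PySem.Chars.splitOn
      (PySem.Chars.replace (PySem.Chars.replace (PySem.Chars.replace el ['('] []) [')'] []) ['*'] [])
      ['S', 'B'])
  (m2.foldl (fun d elem =>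
      if 1 < elem.length then d.insert (String.mk (elem.getD 1 [])) (pvToCoef (elem.getD 0 []))
      else d)
    PySem.Dict.empty).items

-- ===== PORT B =====
def SB_to_dict_alt (mystring : String) : List (String × Int) :=
  -- one pass: split on '+'/'-' term boundaries while dropping '(', ')', ',', '*'
  let p := mystring.toList.foldl (fun (acc : List (List Char) × List Char) ch =>
      if ch = '+' then (acc.1 ++ [acc.2], [])
      else if ch = '-' then (acc.1 ++ [acc.2], ['-'])
      else if ch = '(' ∨ ch = ')' ∨ ch = ',' ∨ ch = '*' then acc
      else (acc.1, acc.2 ++ [ch])) ([], [])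
  let terms := p.1 ++ [p.2]
  (terms.foldl (fun d t =>
      let i := PySem.Chars.find t ['S', 'B']
      if 0 ≤ i then
        let rest := PySem.List.slice t (some (i + 2)) none
        let j := PySem.Chars.find rest ['S', 'B']
        d.insert (String.mk (if j < 0 then rest else PySem.List.slice rest none (some j)))
          (pvToCoef (PySem.List.slice t none (some i)))
      else d)
    PySem.Dict.empty).items

-- ===== PRECONDITION & SPEC =====
-- the terms of the input: pieces between '+'/'-' boundaries (a '-' opens its piece), '(),*' dropped
def pvTerms : List Char → List (List Char)
  | [] => [[]]
  | c :: r =>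
    if c = '+' then [] :: pvTerms r
    else if c = '-' then [] :: (pvTerms r).modifyHead ('-' :: ·)
    else if c = '(' ∨ c = ')' ∨ c = ',' ∨ c = '*' then pvTerms r
    else (pvTerms r).modifyHead (c :: ·)

-- Pre_ excludes exactly the inputs where Python A raises ValueError: some term containing 'SB'
-- whose coefficient part (before the first 'SB') is neither '-', '' nor a valid int() literal.
def Pre_SB_to_dict (mystring : String) : Prop :=
  ∀ t ∈ pvTerms mystring.toList, 0 ≤ PySem.Chars.find t ['S', 'B'] →
    (t.take (PySem.Chars.find t ['S', 'B']).toNat = ['-'] ∨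
     t.take (PySem.Chars.find t ['S', 'B']).toNat = [] ∨
     (PySem.Int.ofChars? (t.take (PySem.Chars.find t ['S', 'B']).toNat)).isSome = true)
instance (mystring : String) : Decidable (Pre_SB_to_dict mystring) := by
  unfold Pre_SB_to_dict; infer_instance

def pvWitness_SB_to_dict : String := "-SB(a)+3*SB(b,c)-12*SB(a)"

def Spec_SB_to_dict (mystring : String) (out : List (String × Int)) : Prop := out = SB_to_dict_alt mystring
instance (mystring : String) (out : List (String × Int)) : Decidable (Spec_SB_to_dict mystring out) := by
  unfold Spec_SB_to_dict; infer_instance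

-- ===== CLAIM (what is proved, stated in full; the proofs are below) =====
def Claim_equal_SB_to_dict : Prop :=
  ∀ (mystring : String), Dom_SB_to_dict mystring → Pre_SB_to_dict mystring →
    Spec_SB_to_dict mystring (SB_to_dict mystring)

-- ===== LEMMAS AND PROOFS =====

theorem pv_replace_go_single (a : Char) (r : List Char) :
    ∀ (l : List Char) (fuel : Nat) (acc : List Char), l.length ≤ fuel →
      PySem.Chars.replace.go [a] r fuel l acc
        = acc.reverse ++ l.flatMap (fun c => if c = a then r else [c]) := by
  intro l
  induction l with
  | nil => intro fuel acc _; cases fuel <;> simp [PySem.Chars.replace.go]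
  | cons c t ih =>
    intro fuel acc hf
    cases fuel with
    | zero => simp at hf
    | succ f =>
      have hp : ([a].isPrefixOf (c :: t)) = (a == c) := by simp [List.isPrefixOf]
      by_cases hc : c = a
      · subst hc
        simp only [PySem.Chars.replace.go, hp, BEq.rfl, if_pos]
        rw [show List.drop [c].length (c :: t) = t from by simp]
        rw [ih f (r.reverse ++ acc) (by simp at hf ⊢; omega)]
        simp
      · have : (a == c) = false := by simp; exact fun h => hc h.symm
        simp only [PySem.Chars.replace.go, hp, this, Bool.false_eq_true, if_neg, not_false_iff]
        rw [ih f (c :: acc) (by simp at hf ⊢; omega)]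
        simp [hc]

theorem pv_replace_single (cs : List Char) (a : Char) (r : List Char) :
    PySem.Chars.replace cs [a] r = cs.flatMap (fun c => if c = a then r else [c]) := by
  rw [PySem.Chars.replace]
  simp only [List.isEmpty_cons, if_neg, Bool.false_eq_true, not_false_iff]
  rw [pv_replace_go_single a r cs cs.length [] le_rfl]
  simp

theorem pv_replace_del (cs : List Char) (a : Char) :
    PySem.Chars.replace cs [a] [] = cs.filter (fun c => !(c = a)) := by
  rw [pv_replace_single]
  induction cs with
  | nil => simp
  | cons c t ih => by_cases hc : c = a <;> simp [hc, ih]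
def pvSplitF (sep : List Char) : List Char → List (List Char)
  | [] => [[]]
  | c :: t =>
    if sep.isPrefixOf (c :: t) then [] :: pvSplitF sep (t.drop (sep.length - 1))
    else (pvSplitF sep t).modifyHead (c :: ·)
  termination_by l => l.length
  decreasing_by all_goals (simp; try omega)

theorem pvSplitF_ne_nil (sep : List Char) (l : List Char) : pvSplitF sep l ≠ [] := by
  cases l with
  | nil => simp [pvSplitF]
  | cons c t =>
    rw [pvSplitF]
    split
    · simp
    · exact fun h => (pvSplitF_ne_nil sep t) (by simpa using List.modifyHead_eq_nil_iff.mp h)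
  termination_by l.length
  decreasing_by all_goals simp

theorem pv_splitOn_go (sep : List Char) (hsep : sep ≠ []) :
    ∀ (fuel : Nat) (l cur : List Char) (acc : List (List Char)), l.length < fuel →
      PySem.Chars.splitOn.go sep fuel l cur acc
        = acc.reverse ++ (pvSplitF sep l).modifyHead (cur.reverse ++ ·) := by
  intro fuel
  induction fuel with
  | zero => intro l cur acc h; omega
  | succ f ih =>
    intro l cur acc h
    cases l with
    | nil => simp [PySem.Chars.splitOn.go, pvSplitF]
    | cons c t =>
      by_cases hpre : sep.isPrefixOf (c :: t)
      · rw [show PySem.Chars.splitOn.go sep (f+1) (c :: t) cur acc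
              = PySem.Chars.splitOn.go sep f ((c :: t).drop sep.length) [] (cur.reverse :: acc) from by
            simp [PySem.Chars.splitOn.go, hpre]]
        have hs1 : 1 ≤ sep.length := List.length_pos_iff.mpr hsep
        rw [ih ((c :: t).drop sep.length) [] (cur.reverse :: acc) (by simp at h ⊢; omega)]
        rw [pvSplitF]
        rw [if_pos hpre]
        have : (c :: t).drop sep.length = t.drop (sep.length - 1) := by
          cases sep with
          | nil => exact absurd rfl hsep
          | cons s ss => simp
        rw [this]
        cases pvSplitF sep (List.drop (sep.length - 1) t) <;> simp
      · rw [show PySem.Chars.splitOn.go sep (f+1) (c :: t) cur acc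
              = PySem.Chars.splitOn.go sep f t (c :: cur) acc from by
            simp [PySem.Chars.splitOn.go, hpre]]
        rw [ih t (c :: cur) acc (by simp at h ⊢; omega)]
        rw [pvSplitF, if_neg hpre]
        rcases hh : pvSplitF sep t with _ | ⟨h0, rest⟩
        · exact absurd hh (pvSplitF_ne_nil sep t)
        · simp

theorem pv_splitOn_eq (cs sep : List Char) (h : sep ≠ []) :
    PySem.Chars.splitOn cs sep = pvSplitF sep cs := by
  rw [PySem.Chars.splitOn, pv_splitOn_go sep h (cs.length + 1) cs [] [] (by omega)]
  rcases hh : pvSplitF sep cs with _ | ⟨h0, rest⟩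
  · exact absurd hh (pvSplitF_ne_nil sep cs)
  · simp

theorem pv_find_go (sub : List Char) :
    ∀ (l : List Char) (k : Nat),
      PySem.Chars.find.go sub l k
        = if PySem.Chars.find.go sub l 0 = -1 then -1 else k + PySem.Chars.find.go sub l 0 := by
  intro l
  induction l with
  | nil =>
    intro k
    by_cases he : sub.isEmpty <;> simp [PySem.Chars.find.go, he]
  | cons c t ih =>
    intro k
    by_cases hpre : sub.isPrefixOf (c :: t)
    · simp [PySem.Chars.find.go, hpre]
    · rw [show PySem.Chars.find.go sub (c :: t) k = PySem.Chars.find.go sub t (k + 1) from by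
        simp [PySem.Chars.find.go, hpre]]
      rw [show PySem.Chars.find.go sub (c :: t) 0 = PySem.Chars.find.go sub t 1 from by
        simp [PySem.Chars.find.go, hpre]]
      rw [ih (k+1), ih 1]
      have hge : (-1:Int) ≤ PySem.Chars.find.go sub t 0 := PySem.Chars.neg_one_le_find t sub
      by_cases hz : PySem.Chars.find.go sub t 0 = -1
      · simp [hz]
      · simp [hz]
        split <;> omega

theorem pv_find_cons (c : Char) (t sub : List Char) :
    PySem.Chars.find (c :: t) sub =
      if sub.isPrefixOf (c :: t) then 0
      else if PySem.Chars.find t sub = -1 then -1 else PySem.Chars.find t sub + 1 := by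
  by_cases hpre : sub.isPrefixOf (c :: t)
  · simp [PySem.Chars.find, PySem.Chars.find.go, hpre]
  · rw [show PySem.Chars.find (c :: t) sub = PySem.Chars.find.go sub t 1 from by
      simp [PySem.Chars.find, PySem.Chars.find.go, hpre]]
    rw [pv_find_go sub t 1]
    rw [show PySem.Chars.find t sub = PySem.Chars.find.go sub t 0 from rfl]
    have hge : (-1:Int) ≤ PySem.Chars.find.go sub t 0 := PySem.Chars.neg_one_le_find t sub
    by_cases hz : PySem.Chars.find.go sub t 0 = -1 <;> simp [hz, hpre] <;> omega

theorem pvSplitF_eq_find (sep : List Char) (h : sep ≠ []) (t : List Char) :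
    pvSplitF sep t =
      if PySem.Chars.find t sep = -1 then [t]
      else t.take (PySem.Chars.find t sep).toNat
            :: pvSplitF sep (t.drop ((PySem.Chars.find t sep).toNat + sep.length)) := by
  induction t using pvSplitF.induct sep with
  | case1 =>
    have : PySem.Chars.find [] sep = -1 := by
      cases sep with
      | nil => exact absurd rfl h
      | cons s ss => simp [PySem.Chars.find, PySem.Chars.find.go]
    simp [pvSplitF, this]
  | case2 c t hpre ih =>
    rw [pvSplitF, if_pos hpre, pv_find_cons c t sep, if_pos hpre]
    have hd2 : List.drop sep.length (c :: t) = t.drop (sep.length - 1) := by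
      cases sep with
      | nil => exact absurd rfl h
      | cons s ss => simp
    simp [hd2]
  | case3 c t hpre ih =>
    rw [pvSplitF, if_neg hpre, pv_find_cons c t sep, if_neg hpre]
    by_cases hz : PySem.Chars.find t sep = -1
    · rw [ih, if_pos hz]
      simp [hz]
    · have hge : (0:Int) ≤ PySem.Chars.find t sep := by
        have := PySem.Chars.neg_one_le_find t sep; omega
      rw [if_neg hz, ih, if_neg hz]
      have h1 : PySem.Chars.find t sep + 1 ≠ -1 := by omega
      rw [if_neg h1]
      have h2 : (PySem.Chars.find t sep + 1).toNat = (PySem.Chars.find t sep).toNat + 1 := by omega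
      have h3 : List.drop ((PySem.Chars.find t sep).toNat + 1 + sep.length) (c :: t)
          = List.drop ((PySem.Chars.find t sep).toNat + sep.length) t := by
        rw [show (PySem.Chars.find t sep).toNat + 1 + sep.length
              = ((PySem.Chars.find t sep).toNat + sep.length) + 1 from by omega,
           List.drop_succ_cons]
      simp [h2, h3]

def pvStep (acc : List (List Char) × List Char) (ch : Char) : List (List Char) × List Char :=
  if ch = '+' then (acc.1 ++ [acc.2], [])
  else if ch = '-' then (acc.1 ++ [acc.2], ['-'])
  else if ch = '(' ∨ ch = ')' ∨ ch = ',' ∨ ch = '*' then acc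
  else (acc.1, acc.2 ++ [ch])

theorem pv_scan_eq (cs : List Char) :
    ∀ (done : List (List Char)) (cur : List Char),
      (cs.foldl pvStep (done, cur)).1 ++ [(cs.foldl pvStep (done, cur)).2]
        = done ++ (pvTerms cs).modifyHead (cur ++ ·) := by
  induction cs with
  | nil => intro done cur; simp [pvTerms]
  | cons c r ih =>
    intro done cur
    rw [List.foldl_cons, pvTerms]
    by_cases h1 : c = '+'
    · subst h1
      rw [show pvStep (done, cur) '+' = (done ++ [cur], []) from by simp [pvStep]]
      rw [ih]
      simp only [if_pos trivial, eq_self_iff_true, if_true]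
      cases pvTerms r <;> simp
    · by_cases h2 : c = '-'
      · subst h2
        rw [show pvStep (done, cur) '-' = (done ++ [cur], ['-']) from by simp [pvStep]]
        rw [ih]
        simp only [h1, if_neg, if_false, eq_self_iff_true, if_true, if_pos]
        simp [h1]
      · by_cases h3 : c = '(' ∨ c = ')' ∨ c = ',' ∨ c = '*'
        · rw [show pvStep (done, cur) c = (done, cur) from by simp [pvStep, h1, h2, h3]]
          rw [ih]
          simp [h1, h2, h3]
        · rw [show pvStep (done, cur) c = (done, cur ++ [c]) from by simp [pvStep, h1, h2, h3]]
          rw [ih]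
          simp only [h1, h2, h3, if_false, if_neg, not_false_iff]
          simp [h1, h2, h3]
          cases pvTerms r <;> simp

def pvStrip (t : List Char) : List Char :=
  ((t.filter (fun c => !(c = '('))).filter (fun c => !(c = ')'))).filter (fun c => !(c = '*'))

theorem pvStrip_cons (c : Char) (x : List Char) :
    pvStrip (c :: x) = if c = '(' ∨ c = ')' ∨ c = '*' then pvStrip x else c :: pvStrip x := by
  by_cases h1 : c = '(' <;> by_cases h2 : c = ')' <;> by_cases h3 : c = '*' <;>
    simp [pvStrip, List.filter_cons, h1, h2, h3]

theorem pv_map_modifyHead {α β : Type} (g : α → β) (f : α → α) (h : β → β) (l : List α)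
    (hc : ∀ x, g (f x) = h (g x)) : (l.modifyHead f).map g = (l.map g).modifyHead h := by
  cases l <;> simp [hc]

theorem pvSplitF_plus_pos (R : List Char) : pvSplitF ['+'] ('+' :: R) = [] :: pvSplitF ['+'] R := by
  rw [pvSplitF, if_pos (by simp [List.isPrefixOf])]
  simp

theorem pvSplitF_plus_neg (c : Char) (R : List Char) (hc : c ≠ '+') :
    pvSplitF ['+'] (c :: R) = (pvSplitF ['+'] R).modifyHead (c :: ·) := by
  rw [pvSplitF, if_neg (by simp [List.isPrefixOf]; exact fun h => hc h.symm)]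

theorem pv_pipeline_eq (cs : List Char) :
    (pvSplitF ['+'] ((cs.flatMap (fun c => if c = '-' then ['+', '-'] else [c])).filter
        (fun c => !(c = ',')))).map pvStrip = pvTerms cs := by
  induction cs with
  | nil => simp [pvSplitF, pvStrip, pvTerms]
  | cons c r ih =>
    rw [List.flatMap_cons, pvTerms]
    by_cases h1 : c = '+'
    · subst h1
      rw [if_neg (by decide)]
      rw [show List.filter (fun c => !(c = ',')) (['+'] ++ List.flatMap (fun c => if c = '-' then ['+', '-'] else [c]) r)
            = '+' :: List.filter (fun c => !(c = ',')) (List.flatMap (fun c => if c = '-' then ['+', '-'] else [c]) r) from by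
          simp [List.filter_cons]]
      rw [pvSplitF_plus_pos, List.map_cons, ih]
      simp [pvStrip]
    · by_cases h2 : c = '-'
      · subst h2
        rw [if_pos rfl]
        rw [show List.filter (fun c => !(c = ',')) (['+', '-'] ++ List.flatMap (fun c => if c = '-' then ['+', '-'] else [c]) r)
              = '+' :: '-' :: List.filter (fun c => !(c = ',')) (List.flatMap (fun c => if c = '-' then ['+', '-'] else [c]) r) from by
            simp [List.filter_cons]]
        rw [pvSplitF_plus_pos, pvSplitF_plus_neg '-' _ (by decide), List.map_cons]
        rw [pv_map_modifyHead pvStrip ('-' :: ·) ('-' :: ·) _ (by intro x; rw [pvStrip_cons]; simp)]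
        rw [ih]
        simp [pvStrip, h1]
      · rw [if_neg h1, if_neg h2]
        by_cases h4 : c = ','
        · subst h4
          rw [if_neg (by decide)]
          rw [show List.filter (fun c => !(c = ',')) ([','] ++ List.flatMap (fun c => if c = '-' then ['+', '-'] else [c]) r)
                = List.filter (fun c => !(c = ',')) (List.flatMap (fun c => if c = '-' then ['+', '-'] else [c]) r) from by
              simp [List.filter_cons]]
          rw [ih, if_pos (by simp)]
        · rw [if_neg h2]
          rw [show List.filter (fun c => !(c = ',')) ([c] ++ List.flatMap (fun c => if c = '-' then ['+', '-'] else [c]) r)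
                = c :: List.filter (fun c => !(c = ',')) (List.flatMap (fun c => if c = '-' then ['+', '-'] else [c]) r) from by
              simp [List.filter_cons, h4]]
          rw [pvSplitF_plus_neg c _ h1]
          by_cases h3 : c = '(' ∨ c = ')' ∨ c = '*'
          · rw [pv_map_modifyHead pvStrip (c :: ·) id _ (by intro x; rw [pvStrip_cons, if_pos h3]; rfl)]
            rw [ih, if_pos (by tauto)]
            cases pvTerms r <;> simp
          · rw [pv_map_modifyHead pvStrip (c :: ·) (c :: ·) _ (by intro x; rw [pvStrip_cons, if_neg h3])]
            rw [ih, if_neg (by tauto)]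

theorem pv_body_eq (d : PySem.Dict String Int) (t : List Char) :
    (if 1 < (pvSplitF ['S', 'B'] t).length then
        d.insert (String.mk ((pvSplitF ['S', 'B'] t).getD 1 []))
          (pvToCoef ((pvSplitF ['S', 'B'] t).getD 0 []))
      else d)
    = (let i := PySem.Chars.find t ['S', 'B']
       if 0 ≤ i then
         let rest := PySem.List.slice t (some (i + 2)) none
         let j := PySem.Chars.find rest ['S', 'B']
         d.insert (String.mk (if j < 0 then rest else PySem.List.slice rest none (some j)))
           (pvToCoef (PySem.List.slice t none (some i)))
       else d) := by
  rw [pvSplitF_eq_find ['S', 'B'] (by decide) t]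
  by_cases hz : PySem.Chars.find t ['S', 'B'] = -1
  · rw [if_pos hz]
    simp [hz]
  · have hge : (0:Int) ≤ PySem.Chars.find t ['S', 'B'] := by
      have := PySem.Chars.neg_one_le_find t ['S', 'B']; omega
    rw [if_neg hz]
    have hlen : 1 < (List.take (PySem.Chars.find t ['S', 'B']).toNat t
        :: pvSplitF ['S', 'B'] (List.drop ((PySem.Chars.find t ['S', 'B']).toNat + ['S', 'B'].length) t)).length := by
      rcases hh : pvSplitF ['S', 'B'] (List.drop ((PySem.Chars.find t ['S', 'B']).toNat + ['S', 'B'].length) t) with _ | ⟨a, b⟩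
      · exact absurd hh (pvSplitF_ne_nil _ _)
      · simp
    rw [if_pos hlen]
    have hslice1 : PySem.List.slice t (some (PySem.Chars.find t ['S', 'B'] + 2)) none
        = List.drop ((PySem.Chars.find t ['S', 'B']).toNat + ['S', 'B'].length) t := by
      rw [PySem.List.slice_from t (by omega : (0:Int) ≤ PySem.Chars.find t ['S', 'B'] + 2)]
      congr 1
      simp; omega
    have hslice2 : PySem.List.slice t none (some (PySem.Chars.find t ['S', 'B']))
        = List.take (PySem.Chars.find t ['S', 'B']).toNat t := PySem.List.slice_to t hge
    simp only [hge, if_pos, if_true]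
    rw [hslice1, hslice2]
    set rest := List.drop ((PySem.Chars.find t ['S', 'B']).toNat + ['S', 'B'].length) t with hrest
    have hkey : (pvSplitF ['S', 'B'] rest).getD 0 []
        = if PySem.Chars.find rest ['S', 'B'] < 0 then rest
          else PySem.List.slice rest none (some (PySem.Chars.find rest ['S', 'B'])) := by
      rw [pvSplitF_eq_find ['S', 'B'] (by decide) rest]
      by_cases hz2 : PySem.Chars.find rest ['S', 'B'] = -1
      · rw [if_pos hz2, if_pos (by omega)]
        rfl
      · have hge2 : (0:Int) ≤ PySem.Chars.find rest ['S', 'B'] := by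
          have := PySem.Chars.neg_one_le_find rest ['S', 'B']; omega
        rw [if_neg hz2, if_neg (by omega), PySem.List.slice_to rest hge2]
        rfl
    simp only [List.getD_cons_succ, List.getD_cons_zero, hkey]

theorem pv_splitOn_plus (cs : List Char) : PySem.Chars.splitOn cs ['+'] = pvSplitF ['+'] cs :=
  pv_splitOn_eq cs ['+'] (by decide)
theorem pv_splitOn_SB (cs : List Char) : PySem.Chars.splitOn cs ['S', 'B'] = pvSplitF ['S', 'B'] cs :=
  pv_splitOn_eq cs ['S', 'B'] (by decide)

theorem pv_main (s : String) : SB_to_dict s = SB_to_dict_alt s := by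
  unfold SB_to_dict SB_to_dict_alt
  dsimp only
  rw [show (fun (acc : List (List Char) × List Char) ch =>
      if ch = '+' then (acc.1 ++ [acc.2], [])
      else if ch = '-' then (acc.1 ++ [acc.2], ['-'])
      else if ch = '(' ∨ ch = ')' ∨ ch = ',' ∨ ch = '*' then acc
      else (acc.1, acc.2 ++ [ch])) = pvStep from rfl]
  rw [show ((s.toList.foldl pvStep ([], [])).1 ++ [(s.toList.foldl pvStep ([], [])).2])
        = pvTerms s.toList from by
    rw [pv_scan_eq s.toList [] []]
    cases pvTerms s.toList <;> simp]
  rw [← pv_pipeline_eq s.toList]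
  rw [pv_replace_del, pv_replace_single, pv_splitOn_plus]
  simp only [pv_replace_del, pv_splitOn_SB]
  rw [List.foldl_map, List.foldl_map]
  congr 1
  apply PySem.List.foldl_congr_mem
  intro acc x _
  exact pv_body_eq acc (((x.filter (fun c => !(c = '('))).filter (fun c => !(c = ')'))).filter (fun c => !(c = '*')))

-- ===== VERDICT (by name: the statement is the Claim_ definition above) =====
theorem SB_to_dict_spec : Claim_equal_SB_to_dict := by
  intro mystring _ _
  exact pv_main mystring
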